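-- pv_equiv track=rewrite | github.com/KyungEunYou/mkm_model | mkm/utils.py | _free_site_regulator
-- ===== SOURCE A (Python) =====
-- def _free_site_regulator(left, right):
--     redundant_free_sites = (len([i for i in right if i == "*" or i.endswith("*")])
--         - len([i for i in left if i == "*" or i.endswith("*")]))
--     if redundant_free_sites < 0:
--         right += ["*"]*abs(redundant_free_sites)
--     elif redundant_free_sites > 0:
--         left += ["*"]*abs(redundant_free_sites)
--     while "*" in left and "*" in right:
--         right.remove("*")
--         left.remove("*")
--     return left, right
-- ===== SOURCE B (Python) =====
-- def _free_site_regulator(left, right):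
--     def is_star(t):
--         return t == "*" or t.endswith("*")
--     diff = sum(1 for t in right if is_star(t)) - sum(1 for t in left if is_star(t))
--     lpad = diff if diff > 0 else 0
--     rpad = -diff if diff < 0 else 0
--     k = min(left.count("*") + lpad, right.count("*") + rpad)
--
--     def rebuild(lst, pad):
--         rem = k
--         out = []
--         for t in lst:
--             if rem > 0 and t == "*":
--                 rem -= 1
--             else:
--                 out.append(t)
--         out.extend(["*"] * (pad - rem))
--         return out
--
--     return rebuild(left, lpad), rebuild(right, rpad)
-- ===== Notes on version B (the rewrite author's own statement) =====
-- stated objective: alternative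
-- what changed: Counts the free-site markers once and rebuilds each list in a single pass (skipping the first k literal '*' and appending any surplus padding), instead of A's while-loop of repeated 'in' tests and list.remove calls.
import Mathlib
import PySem

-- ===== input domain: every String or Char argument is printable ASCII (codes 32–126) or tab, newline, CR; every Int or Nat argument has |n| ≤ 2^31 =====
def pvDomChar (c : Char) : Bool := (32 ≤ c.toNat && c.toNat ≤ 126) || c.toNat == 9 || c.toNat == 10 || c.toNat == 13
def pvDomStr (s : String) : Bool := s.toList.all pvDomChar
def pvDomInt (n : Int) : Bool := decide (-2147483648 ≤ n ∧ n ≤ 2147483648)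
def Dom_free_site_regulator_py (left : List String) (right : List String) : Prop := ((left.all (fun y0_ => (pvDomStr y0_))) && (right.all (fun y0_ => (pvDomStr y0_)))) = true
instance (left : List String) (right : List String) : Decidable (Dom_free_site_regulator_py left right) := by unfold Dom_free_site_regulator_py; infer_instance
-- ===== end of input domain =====

-- B counts the '*' markers once and rebuilds each list in one pass instead of A's repeated
-- list.remove loop; Python A mutates its arguments in place — the equivalence proved here is
-- about the return value only.

-- ===== PORT A =====
-- the 'while "*" in left and "*" in right: right.remove("*"); left.remove("*")' loop
def pvALoop (left right : List String) : List String × List String :=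
  if h : "*" ∈ left ∧ "*" ∈ right then
    pvALoop ((PySem.List.remove? left "*").getD left) ((PySem.List.remove? right "*").getD right)
  else (left, right)
termination_by left.length
decreasing_by
  have h2 := PySem.List.remove?_eq_some_erase left "*" h.1
  rw [h2, Option.getD_some]
  have h3 := List.length_erase_of_mem h.1
  have h4 := List.length_pos_of_mem h.1
  omega

def free_site_regulator_py (left : List String) (right : List String) : List String × List String :=
  let redundant_free_sites : Int :=
    ((right.filter (fun i => i == "*" || PySem.Str.endswith i "*")).length : Int)
      - ((left.filter (fun i => i == "*" || PySem.Str.endswith i "*")).length : Int)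
  if redundant_free_sites < 0 then
    pvALoop left (right ++ List.replicate redundant_free_sites.natAbs "*")
  else if redundant_free_sites > 0 then
    pvALoop (left ++ List.replicate redundant_free_sites.natAbs "*") right
  else
    pvALoop left right

-- ===== PORT B =====
def pvStarTok (t : String) : Bool := t == "*" || PySem.Str.endswith t "*"

-- the 'rebuild' helper of Source B: one pass, skipping the first k literal "*", then padding
def pvRebuild (k : Int) (lst : List String) (pad : Int) : List String :=
  let s := lst.foldl (fun (st : List String × Int) t =>
      if st.2 > 0 && t == "*" then (st.1, st.2 - 1) else (st.1 ++ [t], st.2)) (([] : List String), k)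
  s.1 ++ List.replicate (pad - s.2).toNat "*"

def free_site_regulator_py_alt (left : List String) (right : List String) : List String × List String :=
  let diff : Int := (right.countP pvStarTok : Int) - (left.countP pvStarTok : Int)
  let lpad : Int := if diff > 0 then diff else 0
  let rpad : Int := if diff < 0 then -diff else 0
  let k : Int := min ((PySem.List.count left "*" : Int) + lpad)
                     ((PySem.List.count right "*" : Int) + rpad)
  (pvRebuild k left lpad, pvRebuild k right rpad)

-- ===== PRECONDITION & SPEC =====
def Spec_free_site_regulator_py (left : List String) (right : List String) (out : List String × List String) : Prop := out = free_site_regulator_py_alt left right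
instance (left : List String) (right : List String) (out : List String × List String) : Decidable (Spec_free_site_regulator_py left right out) := by unfold Spec_free_site_regulator_py; infer_instance

-- ===== CLAIM (what is proved, stated in full; the proofs are below) =====
def Claim_equal_free_site_regulator_py : Prop := ∀ (left : List String) (right : List String), Dom_free_site_regulator_py left right → Spec_free_site_regulator_py left right (free_site_regulator_py left right)

-- ===== LEMMAS AND PROOFS =====

-- proof-side: erase the first n literal "*"
def pvEraseN : Nat → List String → List String
  | 0, l => l
  | n+1, l => pvEraseN n (l.erase "*")

lemma pvEraseN_cons_ne (t : String) (ht : t ≠ "*") (n : Nat) (ts : List String) :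
    pvEraseN n (t :: ts) = t :: pvEraseN n ts := by
  induction n generalizing ts with
  | zero => rfl
  | succ n ih =>
    show pvEraseN n ((t :: ts).erase "*") = t :: pvEraseN n (ts.erase "*")
    rw [List.erase_cons_tail (by simpa using ht)]
    exact ih _

lemma pvGo_spec (l : List String) (acc : List String) (r : Int) (hr : 0 ≤ r) :
    l.foldl (fun (st : List String × Int) t =>
        if st.2 > 0 && t == "*" then (st.1, st.2 - 1) else (st.1 ++ [t], st.2)) (acc, r)
      = (acc ++ pvEraseN (min r (l.count "*" : Int)).toNat l,
         r - min r (l.count "*" : Int)) := by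
  induction l generalizing acc r with
  | nil =>
    simp only [List.foldl_nil, List.count_nil, Nat.cast_zero]
    rw [min_eq_right hr]
    simp [pvEraseN]
  | cons t ts ih =>
    by_cases ht : t = "*"
    · subst ht
      by_cases hr0 : (0 : Int) < r
      · simp only [List.foldl_cons]
        rw [if_pos (show (decide ((r : Int) > 0) && (("*" : String) == "*")) = true by
          simp; omega)]
        rw [ih acc (r - 1) (by omega)]
        have hc : (("*" : String) :: ts).count "*" = ts.count "*" + 1 := by
          simp
        have hmin : min r (((("*" : String) :: ts).count "*" : Nat) : Int)
            = min (r - 1) ((ts.count "*" : Nat) : Int) + 1 := by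
          rw [hc]; push_cast; omega
        rw [Prod.mk.injEq]
        refine ⟨?_, ?_⟩
        · congr 1
          rw [hmin]
          have ht2 : (min (r - 1) ((ts.count "*" : Nat) : Int) + 1).toNat
              = (min (r - 1) ((ts.count "*" : Nat) : Int)).toNat + 1 := by omega
          rw [ht2]
          simp only [pvEraseN, List.erase_cons_head]
        · rw [hmin]; ring
      · have hreq : r = 0 := by omega
        subst hreq
        simp only [List.foldl_cons]
        rw [if_neg (show ¬ ((decide ((0:Int) > 0) && (("*" : String) == "*")) = true) by simp)]
        rw [ih (acc ++ ["*"]) 0 le_rfl]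
        have h1 : min (0:Int) ((ts.count "*" : Nat) : Int) = 0 := by omega
        have h2 : min (0:Int) (((("*" : String) :: ts).count "*" : Nat) : Int) = 0 := by omega
        rw [h1, h2]
        simp [pvEraseN]
    · simp only [List.foldl_cons]
      rw [if_neg (show ¬ ((decide ((r:Int) > 0) && (t == "*")) = true) by simp [ht])]
      rw [ih (acc ++ [t]) r hr]
      have hc : (t :: ts).count "*" = ts.count "*" := by
        simp [ht]
      rw [hc, pvEraseN_cons_ne t ht]
      simp

lemma pvEraseN_padded (k : Nat) : ∀ (l : List String) (p : Nat), k ≤ l.count "*" + p →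
    pvEraseN k (l ++ List.replicate p "*")
      = pvEraseN (min k (l.count "*")) l ++ List.replicate (p - (k - l.count "*")) "*" := by
  induction k with
  | zero =>
    intro l p _
    simp [pvEraseN]
  | succ k ih =>
    intro l p hle
    by_cases hc : 0 < l.count "*"
    · have hmem : "*" ∈ l := by
        rw [← List.count_pos_iff]; exact hc
      show pvEraseN k ((l ++ List.replicate p "*").erase "*") = _
      rw [List.erase_append_left _ hmem]
      rw [ih (l.erase "*") p (by rw [List.count_erase_self]; omega)]
      rw [List.count_erase_self]
      have h1 : min k (l.count "*" - 1) + 1 = min (k + 1) (l.count "*") := by omega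
      have h2 : p - (k - (l.count "*" - 1)) = p - (k + 1 - l.count "*") := by omega
      rw [h2]
      congr 1
      rw [← h1]
      rfl
    · have hc0 : l.count "*" = 0 := by omega
      have hmem : "*" ∉ l := by
        rw [← List.count_eq_zero]; exact hc0
      have hp : 0 < p := by omega
      show pvEraseN k ((l ++ List.replicate p "*").erase "*") = _
      rw [List.erase_append_right _ hmem]
      have hrep : (List.replicate p ("*" : String)).erase "*" = List.replicate (p - 1) "*" := by
        obtain ⟨p', rfl⟩ : ∃ p', p = p' + 1 := ⟨p - 1, by omega⟩
        simp [List.replicate_succ]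
      rw [hrep, ih l (p - 1) (by omega)]
      rw [hc0]
      have h1 : min k 0 = min (k + 1) 0 := by omega
      have h2 : p - 1 - (k - 0) = p - (k + 1 - 0) := by omega
      rw [h1, h2]

lemma pvRebuild_eq (l : List String) (pad k : Nat) (h : k ≤ l.count "*" + pad) :
    pvRebuild (k : Int) l (pad : Int) = pvEraseN k (l ++ List.replicate pad "*") := by
  rw [pvEraseN_padded k l pad h]
  unfold pvRebuild
  rw [pvGo_spec l [] (k : Int) (by positivity)]
  simp only [List.nil_append]
  congr 1
  · congr 1
    omega
  · congr 1
    omega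

lemma pvALoop_eq (l r : List String) :
    pvALoop l r = (pvEraseN (min (l.count "*") (r.count "*")) l,
                   pvEraseN (min (l.count "*") (r.count "*")) r) := by
  induction l, r using pvALoop.induct with
  | case1 l r h ih =>
    rw [pvALoop]
    rw [dif_pos h]
    have e1 := PySem.List.remove?_eq_some_erase l "*" h.1
    have e2 := PySem.List.remove?_eq_some_erase r "*" h.2
    rw [e1, e2] at ih ⊢
    simp only [Option.getD_some] at ih ⊢
    rw [ih]
    have hl : 0 < l.count "*" := List.count_pos_iff.mpr h.1
    have hr : 0 < r.count "*" := List.count_pos_iff.mpr h.2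
    rw [List.count_erase_self, List.count_erase_self]
    have hmin : min (l.count "*") (r.count "*")
        = min (l.count "*" - 1) (r.count "*" - 1) + 1 := by omega
    rw [hmin]
    rfl
  | case2 l r h =>
    rw [pvALoop, dif_neg h]
    have : min (l.count "*") (r.count "*") = 0 := by
      rcases not_and_or.mp h with h' | h'
      · have : l.count "*" = 0 := List.count_eq_zero.mpr h'
        omega
      · have : r.count "*" = 0 := List.count_eq_zero.mpr h'
        omega
    rw [this]
    rfl

lemma pvBridge (l r : List String) (lp rp : Nat) :
    pvALoop (l ++ List.replicate lp "*") (r ++ List.replicate rp "*")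
      = (pvRebuild ((min (l.count "*" + lp) (r.count "*" + rp) : Nat) : Int) l (lp : Int),
         pvRebuild ((min (l.count "*" + lp) (r.count "*" + rp) : Nat) : Int) r (rp : Int)) := by
  rw [pvALoop_eq]
  have hcl : (l ++ List.replicate lp ("*" : String)).count "*" = l.count "*" + lp := by
    simp [List.count_append]
  have hcr : (r ++ List.replicate rp ("*" : String)).count "*" = r.count "*" + rp := by
    simp [List.count_append]
  rw [hcl, hcr]
  rw [pvRebuild_eq l lp _ (by omega), pvRebuild_eq r rp _ (by omega)]

-- ===== VERDICT (by name: the statement is the Claim_ definition above) =====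
theorem free_site_regulator_py_spec : Claim_equal_free_site_regulator_py := by
  intro left right _
  show free_site_regulator_py left right = free_site_regulator_py_alt left right
  unfold free_site_regulator_py free_site_regulator_py_alt
  simp only [PySem.List.count_eq]
  have hfilt : ∀ xs : List String,
      (xs.filter (fun i => i == "*" || PySem.Str.endswith i "*")).length = xs.countP pvStarTok := by
    intro xs
    rw [← List.countP_eq_length_filter]
    rfl
  rw [hfilt left, hfilt right]
  set Ls := left.countP pvStarTok with hLs
  set Rs := right.countP pvStarTok with hRs
  rcases Nat.lt_trichotomy Rs Ls with hlt | heq | hgt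
  · have h1 : ((Rs : Int) - (Ls : Int) < 0) := by omega
    rw [if_pos h1, if_neg (by omega), if_pos h1]
    have hna : ((Rs : Int) - (Ls : Int)).natAbs = Ls - Rs := by omega
    rw [hna]
    have := pvBridge left right 0 (Ls - Rs)
    simp only [List.replicate_zero, List.append_nil] at this
    rw [this]
    have hk : ((min (left.count "*" + 0) (right.count "*" + (Ls - Rs)) : Nat) : Int)
        = min ((left.count "*" : Int) + 0) ((right.count "*" : Int) + -((Rs : Int) - (Ls : Int))) := by
      push_cast
      omega
    have hp : (((Ls - Rs : Nat)) : Int) = -((Rs : Int) - (Ls : Int)) := by omega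
    rw [hk, hp]
    norm_num
  · rw [if_neg (by omega), if_neg (by omega), if_neg (by omega), if_neg (by omega)]
    have := pvBridge left right 0 0
    simp only [List.replicate_zero, List.append_nil] at this
    rw [this]
    push_cast
    norm_num
  · have h1 : ¬ ((Rs : Int) - (Ls : Int) < 0) := by omega
    have h2 : ((Rs : Int) - (Ls : Int) > 0) := by omega
    rw [if_neg h1, if_pos h2, if_pos h2, if_neg h1]
    have hna : ((Rs : Int) - (Ls : Int)).natAbs = Rs - Ls := by omega
    rw [hna]
    have := pvBridge left right (Rs - Ls) 0
    simp only [List.replicate_zero, List.append_nil] at this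
    rw [this]
    have hk : ((min (left.count "*" + (Rs - Ls)) (right.count "*" + 0) : Nat) : Int)
        = min ((left.count "*" : Int) + ((Rs : Int) - (Ls : Int))) ((right.count "*" : Int) + 0) := by
      push_cast
      omega
    have hp : (((Rs - Ls : Nat)) : Int) = (Rs : Int) - (Ls : Int) := by omega
    rw [hk, hp]
    norm_num
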